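-- pv_equiv track=rewrite | github.com/Joseda8/profiler | test_cases/projects/energy_consumption/scenarios/threads_objects/2/hash_records.py | chunk_indices
-- ===== SOURCE A (Python) =====
-- from typing import Iterable, List, Tuple
--
-- def chunk_indices(total_items: int, num_workers: int) -> Iterable[Tuple[int, int]]:
--     items_per_worker = (total_items + num_workers - 1) // num_workers
--     for worker_index in range(num_workers):
--         start_index = worker_index * items_per_worker
--         end_index = min(start_index + items_per_worker, total_items)
--         if start_index >= total_items:
--             break
--         yield start_index, end_index
-- ===== SOURCE B (Python) =====
-- def chunk_indices(total_items, num_workers):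
--     items_per_worker = (total_items + num_workers - 1) // num_workers
--     if total_items <= 0 or num_workers <= 0:
--         return []
--     bounds = list(range(0, total_items, items_per_worker)) + [total_items]
--     return list(zip(bounds, bounds[1:]))
-- ===== Notes on version B (the rewrite author's own statement) =====
-- stated objective: alternative
-- what changed: B builds the list of chunk boundaries once (range(0, total_items, items_per_worker) plus the final boundary total_items) and produces the chunks by zipping the boundary list with its own tail, instead of A's per-worker loop that computes start = worker_index*items_per_worker, takes a min for the end and breaks on trailing empty workers; the boundary walk is done by the C-level range/zip machinery rather than per-worker Python bytecode
import Mathlib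
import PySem

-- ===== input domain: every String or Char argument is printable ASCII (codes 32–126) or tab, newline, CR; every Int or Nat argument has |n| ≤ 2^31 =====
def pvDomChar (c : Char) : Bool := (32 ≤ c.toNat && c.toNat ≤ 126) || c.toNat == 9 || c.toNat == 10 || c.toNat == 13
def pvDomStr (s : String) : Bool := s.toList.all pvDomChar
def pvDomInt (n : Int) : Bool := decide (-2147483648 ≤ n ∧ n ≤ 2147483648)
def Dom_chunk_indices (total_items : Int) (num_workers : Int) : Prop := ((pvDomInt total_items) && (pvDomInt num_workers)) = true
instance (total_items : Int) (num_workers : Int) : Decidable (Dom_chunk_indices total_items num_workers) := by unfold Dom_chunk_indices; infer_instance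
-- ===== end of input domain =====

-- B computes the boundary list (range with step items_per_worker, plus total_items) and zips it with its tail; alternative decomposition, same cost.


-- ===== PORT A =====
-- A's `for worker_index in range(num_workers)` with `break`: the fuel is the number of
-- remaining range elements, so the recursion stops exactly where Python breaks
def chunkALoop (total_items items_per_worker : Int) : Nat → Int → List (Int × Int) → List (Int × Int)
  | 0, _, acc => acc
  | remaining + 1, worker_index, acc =>
    let start_index := worker_index * items_per_worker
    let end_index := min (start_index + items_per_worker) total_items
    if start_index ≥ total_items then acc
    else chunkALoop total_items items_per_worker remaining (worker_index + 1) (acc ++ [(start_index, end_index)])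

def chunk_indices (total_items : Int) (num_workers : Int) : List (Int × Int) :=
  chunkALoop total_items (PySem.Int.floordiv (total_items + num_workers - 1) num_workers)
    num_workers.toNat 0 []

-- ===== PORT B =====
-- boundary list + zip with its tail (bounds[1:] ported as the slice)
def chunk_indices_alt (total_items : Int) (num_workers : Int) : List (Int × Int) :=
  let items_per_worker := PySem.Int.floordiv (total_items + num_workers - 1) num_workers
  if total_items ≤ 0 ∨ num_workers ≤ 0 then []
  else
    let bounds := PySem.List.pyRange 0 total_items items_per_worker ++ [total_items]
    bounds.zip (PySem.List.slice bounds (some 1) none)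

-- ===== PRECONDITION & SPEC =====
-- Pre_ excludes only num_workers = 0, where A raises ZeroDivisionError.
def Pre_chunk_indices (total_items : Int) (num_workers : Int) : Prop := num_workers ≠ 0
instance (total_items : Int) (num_workers : Int) : Decidable (Pre_chunk_indices total_items num_workers) := by unfold Pre_chunk_indices; infer_instance

def pvWitness_chunk_indices : Int × Int := (10, 3)

def Spec_chunk_indices (total_items : Int) (num_workers : Int) (out : List (Int × Int)) : Prop := out = chunk_indices_alt total_items num_workers
instance (total_items : Int) (num_workers : Int) (out : List (Int × Int)) : Decidable (Spec_chunk_indices total_items num_workers out) := by unfold Spec_chunk_indices; infer_instance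

-- ===== CLAIM (what is proved, stated in full; the proofs are below) =====
def Claim_equal_chunk_indices : Prop := ∀ (total_items : Int) (num_workers : Int), Dom_chunk_indices total_items num_workers → Pre_chunk_indices total_items num_workers → Spec_chunk_indices total_items num_workers (chunk_indices total_items num_workers)

-- ===== LEMMAS AND PROOFS =====

-- a positive-step range unfolds one element at a time
lemma pyRange_pos_cons (a b s : Int) (hs : 0 < s) (hab : a < b) :
    PySem.List.pyRange a b s = a :: PySem.List.pyRange (a + s) b s := by
  rw [PySem.List.pyRange_of_pos a b hs, PySem.List.pyRange_of_pos (a + s) b hs]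
  by_cases h : a + s < b
  · rw [if_pos hab, if_pos h]
    have he : b - a + s - 1 = (b - (a + s) + s - 1) + 1 * s := by ring
    have hd : (b - a + s - 1) / s = (b - (a + s) + s - 1) / s + 1 := by
      rw [he, Int.add_mul_ediv_right _ _ (by omega : s ≠ 0)]
    have hn : ((b - a + s - 1) / s).toNat = ((b - (a + s) + s - 1) / s).toNat + 1 := by
      have hpos : 0 ≤ (b - (a + s) + s - 1) / s := Int.ediv_nonneg (by omega) (by omega)
      omega
    rw [hn, List.range_succ_eq_map]
    simp [List.map_map, Function.comp]
    intro k _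
    ring
  · rw [if_pos hab, if_neg h]
    have he : b - a + s - 1 = (b - a - 1) + 1 * s := by ring
    rw [he, Int.add_mul_ediv_right _ _ (by omega : s ≠ 0),
      Int.ediv_eq_zero_of_lt (by omega) (by omega)]
    simp

lemma pyRange_pos_nil (a b s : Int) (hs : 0 < s) (hab : b ≤ a) :
    PySem.List.pyRange a b s = [] := by
  rw [PySem.List.pyRange_of_pos a b hs, if_neg (by omega)]
  simp

-- zipping a two-or-more-element list with its tail peels one pair
lemma zip_tail_cons {α : Type} (x y : α) (l : List α) :
    (x :: y :: l).zip (x :: y :: l).tail = (x, y) :: (y :: l).zip (y :: l).tail := rfl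

-- B's value from cursor s, as one definition the induction can speak about
def boundsFrom (total ipw s : Int) : List (Int × Int) :=
  (PySem.List.pyRange s total ipw ++ [total]).zip (PySem.List.pyRange s total ipw ++ [total]).tail

lemma boundsFrom_stop (total ipw s : Int) (hipw : 0 < ipw) (h : total ≤ s) :
    boundsFrom total ipw s = [] := by
  unfold boundsFrom
  rw [pyRange_pos_nil s total ipw hipw h]
  rfl

lemma boundsFrom_step (total ipw s : Int) (hipw : 0 < ipw) (h : s < total) :
    boundsFrom total ipw s = (s, min (s + ipw) total) :: boundsFrom total ipw (s + ipw) := by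
  unfold boundsFrom
  rw [pyRange_pos_cons s total ipw hipw h]
  by_cases h2 : s + ipw < total
  · rw [pyRange_pos_cons (s + ipw) total ipw hipw h2, min_eq_left (by omega)]
    simp only [List.cons_append]
    exact zip_tail_cons _ _ _
  · rw [pyRange_pos_nil (s + ipw) total ipw hipw (by omega)]
    rw [min_eq_right (by omega)]
    rfl

-- A's loop from worker k equals B's zipped boundaries from cursor k*ipw
lemma loop_inv (total nw ipw : Int) (hipw : 0 < ipw) (htot : total ≤ nw * ipw) :
    ∀ (n : Nat) (k : Int) (acc : List (Int × Int)), k ≤ nw → (nw - k).toNat = n →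
      chunkALoop total ipw n k acc = acc ++ boundsFrom total ipw (k * ipw) := by
  intro n
  induction n with
  | zero =>
    intro k acc hk hn
    have hke : k = nw := by omega
    subst hke
    rw [boundsFrom_stop total ipw (k * ipw) hipw (by omega)]
    simp [chunkALoop]
  | succ n ih =>
    intro k acc hk hn
    by_cases h : k * ipw ≥ total
    · rw [boundsFrom_stop total ipw (k * ipw) hipw h]
      simp [chunkALoop, h]
    · push Not at h
      simp only [chunkALoop, if_neg (not_le.mpr h)]
      rw [ih (k + 1) _ (by omega) (by omega)]
      rw [boundsFrom_step total ipw (k * ipw) hipw h]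
      have harith : (k + 1) * ipw = k * ipw + ipw := by ring
      rw [harith]
      simp

-- ceiling-division facts for nw > 0: ipw ≥ 1 when total > 0, and nw * ipw ≥ total
lemma ipw_facts (total nw : Int) (hnw : 0 < nw) :
    total ≤ nw * PySem.Int.floordiv (total + nw - 1) nw ∧
      (0 < total → 0 < PySem.Int.floordiv (total + nw - 1) nw) := by
  rw [PySem.Int.floordiv_eq_ediv_of_pos hnw]
  have hadd := Int.mul_ediv_add_emod (total + nw - 1) nw
  have hmod0 := Int.emod_nonneg (total + nw - 1) (by omega : nw ≠ 0)
  have hmodlt := Int.emod_lt_of_pos (total + nw - 1) hnw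
  refine ⟨by omega, fun ht => ?_⟩
  by_contra hc
  push Not at hc
  have hnp : nw * ((total + nw - 1) / nw) ≤ 0 := mul_nonpos_of_nonneg_of_nonpos (by omega) hc
  omega

-- ===== VERDICT (by name: the statement is the Claim_ definition above) =====
theorem chunk_indices_spec : Claim_equal_chunk_indices := by
  intro total nw _ hpre
  unfold Spec_chunk_indices chunk_indices chunk_indices_alt
  by_cases hnw : 0 < nw
  · obtain ⟨h1, h2⟩ := ipw_facts total nw hnw
    set ipw := PySem.Int.floordiv (total + nw - 1) nw with hipw
    by_cases ht : 0 < total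
    · have h := loop_inv total nw ipw (h2 ht) h1 nw.toNat 0 [] (by omega) (by omega)
      simp only [zero_mul, List.nil_append] at h
      rw [h, if_neg (by omega)]
      simp only [boundsFrom, PySem.List.slice_from_one]
    · -- total ≤ 0 : A breaks at worker 0; B's guard is true
      obtain ⟨m, hm⟩ : ∃ m, nw.toNat = m + 1 := ⟨nw.toNat - 1, by omega⟩
      rw [hm, if_pos (Or.inl (by omega))]
      simp only [chunkALoop]
      rw [if_pos (by omega : (0 : Int) * ipw ≥ total)]
  · have hz : nw.toNat = 0 := by omega
    rw [hz, if_pos (Or.inr (by omega))]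
    rfl
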